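-- pv_equiv track=rewrite | github.com/Jaster25/problem-solving | Programmers/[17681] [1차] 비밀지도.py | solution
-- ===== SOURCE A (Python) =====
-- def solution(n, arr1, arr2):
--     secret_map = [[0] * n for _ in range(n)]
--     for i in range(n):
--         # arr1_bits = ("0" * n + bin(arr1[i])[2:])[-n:]
--         # arr2_bits = ("0" * n + bin(arr2[i])[2:])[-n:]
--         arr1_bits = bin(arr1[i])[2:].rjust(n, "0")
--         arr2_bits = bin(arr2[i])[2:].rjust(n, "0")
--
--         for j in range(n):
--             arr1_bit = int(arr1_bits[j])
--             arr2_bit = int(arr2_bits[j])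
--             secret_map[i][j] = "#" if arr1_bit + arr2_bit > 0 else " "
--
--     for i in range(n):
--         secret_map[i] = "".join(secret_map[i])
--     return secret_map
-- ===== SOURCE B (Python) =====
-- _TABLE = str.maketrans("01", " #")
--
--
-- def solution(n, arr1, arr2):
--     return [format(arr1[i] | arr2[i], "b").rjust(n, "0").translate(_TABLE)
--             for i in range(n)]
-- ===== Notes on version B (the rewrite author's own statement) =====
-- stated objective: idiomatic
-- what changed: Replaces A's inner per-column loop over two independently padded bit strings (int() per char, digit-sum test) with one integer bitwise OR per row followed by a single translation of its padded binary string.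
-- outside the precondition, e.g. on solution(1, [2], [0]): A returns ['#'], B returns ['# ']
import Mathlib
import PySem

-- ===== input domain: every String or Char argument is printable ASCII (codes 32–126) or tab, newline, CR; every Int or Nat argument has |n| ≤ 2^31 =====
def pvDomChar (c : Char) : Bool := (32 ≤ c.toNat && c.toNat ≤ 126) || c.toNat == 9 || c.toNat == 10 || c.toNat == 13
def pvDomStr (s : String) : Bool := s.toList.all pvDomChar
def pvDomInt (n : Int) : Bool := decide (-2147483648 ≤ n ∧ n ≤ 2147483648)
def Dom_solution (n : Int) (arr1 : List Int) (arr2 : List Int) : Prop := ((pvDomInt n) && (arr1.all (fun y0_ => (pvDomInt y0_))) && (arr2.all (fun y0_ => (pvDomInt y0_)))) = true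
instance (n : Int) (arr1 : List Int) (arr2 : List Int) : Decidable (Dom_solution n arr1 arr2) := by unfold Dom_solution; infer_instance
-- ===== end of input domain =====

-- B replaces A's inner per-column loop (two padded bit strings, int() per char, digit-sum test)
-- with one integer bitwise OR per row and a single character-translation of its padded binary form.

-- port of str.rjust(s, w, "0") on a char list (library call used by both Pythons); exact
def pyRjust0 (cs : List Char) (w : Int) : List Char :=
  List.replicate (w.toNat - cs.length) '0' ++ cs

-- ===== PORT A =====
-- int(c) for a one-char string; default 0 stands for the ValueError on a non-digit char,
-- which Pre_solution excludes (negative entries put a 'b' or '-' in the sliced bit string)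
def pyDigitInt (c : Char) : Int := (PySem.Int.ofChars? [c]).getD 0

-- rows of secret_map are built independently, so the row-mutation loop and the final
-- join loop are rendered as one map per row; "".join of the one-char strings "#"/" "
-- is rendered as String.ofList over the corresponding chars (exact)
def solution (n : Int) (arr1 : List Int) (arr2 : List Int) : List String :=
  (PySem.List.pyRange 0 n 1).map (fun i =>
    let bits1 := pyRjust0 (PySem.List.slice (PySem.Int.toBinChars0b ((PySem.List.pyGet? arr1 i).getD 0)) (some 2) none) n
    let bits2 := pyRjust0 (PySem.List.slice (PySem.Int.toBinChars0b ((PySem.List.pyGet? arr2 i).getD 0)) (some 2) none) n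
    String.ofList ((PySem.List.pyRange 0 n 1).map (fun j =>
      if pyDigitInt ((PySem.List.pyGet? bits1 j).getD ' ') + pyDigitInt ((PySem.List.pyGet? bits2 j).getD ' ') > 0
      then '#' else ' ')))

-- ===== PORT B =====
-- str.translate with {'0': ' ', '1': '#'}
def trMap (c : Char) : Char := if c = '0' then ' ' else if c = '1' then '#' else c

def solution_alt (n : Int) (arr1 : List Int) (arr2 : List Int) : List String :=
  (PySem.List.pyRange 0 n 1).map (fun i =>
    String.ofList ((pyRjust0
      (PySem.Int.toBinChars (PySem.Int.bor ((PySem.List.pyGet? arr1 i).getD 0) ((PySem.List.pyGet? arr2 i).getD 0)))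
      n).map trMap))

-- ===== PRECONDITION & SPEC =====
-- Pre_ excludes: n > len(arr) (A raises IndexError); negative entries (A raises ValueError on
-- int('b')); and entries ≥ 2^n, where A returns a row built from only the first n chars of each
-- operand's over-long bit string — a corner outside the problem's guaranteed domain (values < 2^n)
-- where A's per-operand truncation and B's untruncated row are equally unspecified.
def Pre_solution (n : Int) (arr1 : List Int) (arr2 : List Int) : Prop :=
  n ≤ arr1.length ∧ n ≤ arr2.length ∧
  ∀ i < n.toNat, 0 ≤ arr1.getD i 0 ∧ arr1.getD i 0 < 2 ^ n.toNat ∧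
                 0 ≤ arr2.getD i 0 ∧ arr2.getD i 0 < 2 ^ n.toNat
instance (n : Int) (arr1 : List Int) (arr2 : List Int) : Decidable (Pre_solution n arr1 arr2) := by
  unfold Pre_solution; infer_instance

def pvWitness_solution : Int × List Int × List Int := (2, [1, 2], [2, 3])

def Spec_solution (n : Int) (arr1 : List Int) (arr2 : List Int) (out : List String) : Prop := out = solution_alt n arr1 arr2
instance (n : Int) (arr1 : List Int) (arr2 : List Int) (out : List String) : Decidable (Spec_solution n arr1 arr2 out) := by unfold Spec_solution; infer_instance

-- ===== CLAIM (what is proved, stated in full; the proofs are below) =====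
def Claim_equal_solution : Prop := ∀ (n : Int) (arr1 : List Int) (arr2 : List Int), Dom_solution n arr1 arr2 → Pre_solution n arr1 arr2 → Spec_solution n arr1 arr2 (solution n arr1 arr2)

-- ===== LEMMAS AND PROOFS =====

-- Nat.toDigits 2 as a structural recursion (MSB first)
def recBits (x : Nat) : List Char :=
  if h : x / 2 = 0 then [Nat.digitChar (x % 2)]
  else recBits (x / 2) ++ [Nat.digitChar (x % 2)]
decreasing_by exact Nat.div_lt_self (by omega) (by omega)

lemma toDigitsCore_eq (f x : Nat) (l : List Char) (h : x < f) :
    Nat.toDigitsCore 2 f x l = recBits x ++ l := by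
  induction x using Nat.strong_induction_on generalizing f l with
  | _ x ih =>
    cases f with
    | zero => omega
    | succ f =>
      rw [recBits]
      by_cases h0 : x / 2 = 0
      · simp [Nat.toDigitsCore, h0]
      · have hlt : x / 2 < x := Nat.div_lt_self (by omega) (by omega)
        simp only [Nat.toDigitsCore, h0, ite_false]
        rw [ih (x / 2) hlt f _ (by omega)]
        simp

lemma toDigits_two (x : Nat) : Nat.toDigits 2 x = recBits x := by
  simpa using toDigitsCore_eq (x + 1) x [] (by omega)

-- the width-m binary string of x (MSB first)
def wbits : Nat → Nat → List Char
  | 0, _ => []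
  | m + 1, x => wbits m (x / 2) ++ [Nat.digitChar (x % 2)]

lemma length_wbits (m x : Nat) : (wbits m x).length = m := by
  induction m generalizing x with
  | zero => rfl
  | succ m ih => simp [wbits, ih]

lemma wbits_zero (m : Nat) : wbits m 0 = List.replicate m '0' := by
  induction m with
  | zero => rfl
  | succ m ih => simp [wbits, ih, List.replicate_succ']; decide

lemma wbits_pad (j m x : Nat) (h : x < 2 ^ m) :
    wbits (j + m) x = List.replicate j '0' ++ wbits m x := by
  induction m generalizing x with
  | zero =>
    interval_cases x
    simp [wbits, wbits_zero]
  | succ m ih =>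
    have h2 : (2 : Nat) ^ (m + 1) = 2 * 2 ^ m := by ring
    have hx : x / 2 < 2 ^ m := by omega
    show wbits (j + m + 1) x = _
    simp [wbits, ih _ hx, List.append_assoc]

lemma recBits_spec (x : Nat) :
    1 ≤ (recBits x).length ∧ x < 2 ^ (recBits x).length ∧
    (x ≠ 0 → 2 ^ ((recBits x).length - 1) ≤ x) ∧ recBits x = wbits (recBits x).length x := by
  induction x using Nat.strong_induction_on with
  | _ x ih =>
    rw [recBits]
    by_cases h0 : x / 2 = 0
    · simp only [h0, dif_pos]
      refine ⟨by simp, by simpa using (by omega : x < 2), fun _ => by simpa using (by omega : 1 ≤ x), ?_⟩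
      simp [wbits]
    · have hlt : x / 2 < x := Nat.div_lt_self (by omega) (by omega)
      obtain ⟨hk1, hk2, hk3, hk4⟩ := ih (x / 2) hlt
      have hlow := hk3 h0
      set k := (recBits (x / 2)).length with hk
      have h2 : (2 : Nat) ^ (k + 1) = 2 * 2 ^ k := by ring
      have h3 : (2 : Nat) ^ k = 2 ^ (k - 1) * 2 := by
        conv_lhs => rw [show k = (k - 1) + 1 by omega, pow_succ]
      simp only [h0, dif_neg, not_false_iff, List.length_append,
        List.length_cons, List.length_nil]
      refine ⟨by omega, by rw [h2]; omega, fun _ => by simpa using (by omega : 2 ^ k ≤ x), ?_⟩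
      show _ = wbits (k + 1) x
      simp [wbits, ← hk4]

lemma rjust_recBits (m x : Nat) (hx : x < 2 ^ m) (hm : 1 ≤ m) :
    List.replicate (m - (recBits x).length) '0' ++ recBits x = wbits m x := by
  obtain ⟨hk1, hk2, hk3, hk4⟩ := recBits_spec x
  set k := (recBits x).length with hk
  have hkm : k ≤ m := by
    by_cases hx0 : x = 0
    · subst hx0
      have : recBits 0 = ['0'] := by rw [recBits]; rfl
      rw [hk, this]; simpa using hm
    · have := hk3 hx0
      have : (2 : Nat) ^ (k - 1) < 2 ^ m := lt_of_le_of_lt this hx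
      have := Nat.pow_lt_pow_iff_right (a := 2) (by omega) |>.mp this
      omega
  rw [hk4, ← wbits_pad (m - k) k x hk2, show m - k + k = m by omega]

lemma lor_div_two (a b : Nat) : (a ||| b) / 2 = a / 2 ||| b / 2 := by
  apply Nat.eq_of_testBit_eq; intro i
  simp [Nat.testBit_div_two]

lemma lor_mod_two (a b : Nat) : (a ||| b) % 2 = a % 2 ||| b % 2 := by
  have h := Nat.testBit_lor a b 0
  rcases Nat.mod_two_eq_zero_or_one a with h1 | h1 <;> rcases Nat.mod_two_eq_zero_or_one b with h2 | h2 <;>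
    rcases Nat.mod_two_eq_zero_or_one (a ||| b) with h3 | h3 <;>
      simp [Nat.testBit_zero, h1, h2, h3] at h ⊢

lemma getD_append_singleton (xs : List Char) (c d : Char) (k : Nat) (h : k = xs.length) :
    (xs ++ [c]).getD k d = c := by
  subst h; simp [List.getD_eq_getElem?_getD]

lemma row_or (m a b : Nat) :
    (List.range m).map (fun k =>
        if pyDigitInt ((wbits m a).getD k ' ') + pyDigitInt ((wbits m b).getD k ' ') > 0
        then '#' else ' ')
      = (wbits m (a ||| b)).map trMap := by
  induction m generalizing a b with
  | zero => rfl
  | succ m ih =>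
    have hla : (wbits m (a / 2)).length = m := length_wbits m _
    have hlb : (wbits m (b / 2)).length = m := length_wbits m _
    rw [List.range_succ, List.map_append]
    show _ = (wbits m ((a ||| b) / 2) ++ [Nat.digitChar ((a ||| b) % 2)]).map trMap
    rw [List.map_append, lor_div_two, lor_mod_two]
    congr 1
    · rw [← ih (a / 2) (b / 2)]
      apply List.map_congr_left
      intro k hk
      have hk' : k < m := List.mem_range.mp hk
      simp only [wbits]
      simp only [List.getD_append _ _ _ _ (show k < (wbits m (a / 2)).length by rw [hla]; exact hk'),
          List.getD_append _ _ _ _ (show k < (wbits m (b / 2)).length by rw [hlb]; exact hk')]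
    · simp only [wbits, List.map_cons, List.map_nil]
      simp only [getD_append_singleton _ _ _ _ hla.symm, getD_append_singleton _ _ _ _ hlb.symm]
      rcases Nat.mod_two_eq_zero_or_one a with h1 | h1 <;>
        rcases Nat.mod_two_eq_zero_or_one b with h2 | h2 <;> rw [h1, h2] <;> decide

-- ===== VERDICT (by name: the statement is the Claim_ definition above) =====
lemma getD_pyGet? {α : Type} (xs : List α) (i : Int) (hi : 0 ≤ i) (d : α) :
    (PySem.List.pyGet? xs i).getD d = xs.getD i.toNat d := by
  rw [PySem.List.pyGet?_of_nonneg _ hi]; exact List.getD_eq_getElem?_getD.symm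

lemma rjust_toDigits (m x : Nat) (w : Int) (hw : w.toNat = m) (hx : x < 2 ^ m) (hm : 1 ≤ m) :
    pyRjust0 (Nat.toDigits 2 x) w = wbits m x := by
  rw [pyRjust0, hw, toDigits_two]
  exact rjust_recBits m x hx hm

theorem solution_spec : Claim_equal_solution := by
  intro n arr1 arr2 _hdom hpre
  obtain ⟨h1, h2, hv⟩ := hpre
  unfold Spec_solution solution solution_alt
  apply List.map_congr_left
  intro i hi
  obtain ⟨hi0, hin⟩ := PySem.List.mem_pyRange_one.mp hi
  set m := n.toNat with hm
  have him : i.toNat < m := by omega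
  have hm1 : 1 ≤ m := by omega
  obtain ⟨ha0, ha1, hb0, hb1⟩ := hv i.toNat him
  set a := arr1.getD i.toNat 0 with hadef
  set b := arr2.getD i.toNat 0 with hbdef
  have hc : ((2 ^ m : Nat) : Int) = (2 : Int) ^ m := by push_cast; ring
  have haN : a.toNat < 2 ^ m := by omega
  have hbN : b.toNat < 2 ^ m := by omega
  have hga : (PySem.List.pyGet? arr1 i).getD 0 = a := getD_pyGet? arr1 i hi0 0
  have hgb : (PySem.List.pyGet? arr2 i).getD 0 = b := getD_pyGet? arr2 i hi0 0
  have key1 : pyRjust0 (PySem.List.slice (PySem.Int.toBinChars0b a) (some 2) none) n = wbits m a.toNat := by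
    rw [PySem.Int.toBinChars0b, if_neg (by omega), PySem.List.slice_from _ (by norm_num)]
    rw [show Int.toNat 2 = 2 from rfl, List.drop_succ_cons, List.drop_succ_cons, List.drop_zero]
    exact rjust_toDigits m a.toNat n hm.symm haN hm1
  have key2 : pyRjust0 (PySem.List.slice (PySem.Int.toBinChars0b b) (some 2) none) n = wbits m b.toNat := by
    rw [PySem.Int.toBinChars0b, if_neg (by omega), PySem.List.slice_from _ (by norm_num)]
    rw [show Int.toNat 2 = 2 from rfl, List.drop_succ_cons, List.drop_succ_cons, List.drop_zero]
    exact rjust_toDigits m b.toNat n hm.symm hbN hm1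
  have key3 : pyRjust0 (PySem.Int.toBinChars (PySem.Int.bor a b)) n = wbits m (a.toNat ||| b.toNat) := by
    rw [PySem.Int.bor_of_nonneg ha0 hb0, PySem.Int.toBinChars, if_neg (by omega), Int.toNat_natCast]
    exact rjust_toDigits m _ n hm.symm (Nat.bitwise_lt_two_pow haN hbN) hm1
  simp only [hga, hgb, key1, key2, key3]
  congr 1
  rw [PySem.List.pyRange_one, show (n - 0).toNat = m by omega, List.map_map]
  rw [← row_or m a.toNat b.toNat]
  apply List.map_congr_left
  intro k _
  simp
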